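-- pv_equiv track=rewrite | github.com/ShuvamBose/DFA_AFLL_Assignment_Language-aa-.-bbb- | Shuvam_Regex_AFLL.py | my_valid
-- ===== SOURCE A (Python) =====
-- def my_valid(str_): #string validator func.
--     c_a=0;c_b=0;
--     if 'ba' in str_:
--             return -1
--
--     else:
--         for i in str_:
--             if i=='a':
--                 c_a+=1
--             elif i=='b':
--                 c_b+=1
--             elif not (i in 'ab'):
--                 return 0
--
--         if c_a % 2==0 and c_b >0 and c_b % 3==0 :
--             return 1
--         else :
--             return 2
-- ===== SOURCE B (Python) =====
-- def my_valid(str_):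
--     if 'ba' in str_:
--         return -1
--     if any(ch not in 'ab' for ch in str_):
--         return 0
--     c_a = str_.count('a')
--     c_b = str_.count('b')
--     return 1 if c_a % 2 == 0 and c_b > 0 and c_b % 3 == 0 else 2
-- ===== Notes on version B (the rewrite author's own statement) =====
-- stated objective: simpler
-- what changed: Replaces the fused counting/validating loop (per-character branch dispatch with early return) by three separate whole-string passes: a substring guard, an any() check for invalid characters, and two str.count calls feeding the same final classification.
import Mathlib
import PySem

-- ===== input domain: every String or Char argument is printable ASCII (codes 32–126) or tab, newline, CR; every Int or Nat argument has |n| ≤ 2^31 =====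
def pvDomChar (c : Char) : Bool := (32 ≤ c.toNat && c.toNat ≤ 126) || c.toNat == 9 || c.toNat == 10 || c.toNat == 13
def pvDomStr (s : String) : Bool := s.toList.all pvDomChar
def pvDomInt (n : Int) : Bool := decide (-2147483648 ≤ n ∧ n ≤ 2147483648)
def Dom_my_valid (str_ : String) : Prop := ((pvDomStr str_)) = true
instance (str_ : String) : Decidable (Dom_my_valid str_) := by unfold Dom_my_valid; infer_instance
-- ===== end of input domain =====

-- B replaces A's fused counting/validating loop by an invalid-character guard plus two count passes (objective: simpler).

-- ===== PORT A =====
-- the for-loop over str_ with counters c_a, c_b and early return 0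
def myValidLoop : List Char → Int → Int → Int
  | [], c_a, c_b =>
      if PySem.Int.mod c_a 2 = 0 ∧ (c_b > 0 ∧ PySem.Int.mod c_b 3 = 0) then 1 else 2
  | i :: rest, c_a, c_b =>
      if i = 'a' then myValidLoop rest (c_a + 1) c_b
      else if i = 'b' then myValidLoop rest c_a (c_b + 1)
      else if ¬ (PySem.Chars.isIn [i] ['a', 'b'] = true) then 0
      else myValidLoop rest c_a c_b

def my_valid (str_ : String) : Int :=
  if PySem.Str.isIn "ba" str_ then -1
  else myValidLoop str_.toList 0 0

-- ===== PORT B =====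
def my_valid_alt (str_ : String) : Int :=
  if PySem.Str.isIn "ba" str_ then -1
  else if str_.toList.any (fun ch => !(PySem.Chars.isIn [ch] ['a', 'b'])) then 0
  else
    let c_a : Int := (PySem.Str.count str_ "a" : Int)
    let c_b : Int := (PySem.Str.count str_ "b" : Int)
    if PySem.Int.mod c_a 2 = 0 ∧ (c_b > 0 ∧ PySem.Int.mod c_b 3 = 0) then 1 else 2

-- ===== PRECONDITION & SPEC =====
def Spec_my_valid (str_ : String) (out : Int) : Prop := out = my_valid_alt str_
instance (str_ : String) (out : Int) : Decidable (Spec_my_valid str_ out) := by unfold Spec_my_valid; infer_instance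

-- ===== CLAIM (what is proved, stated in full; the proofs are below) =====
def Claim_equal_my_valid : Prop := ∀ (str_ : String), Dom_my_valid str_ → Spec_my_valid str_ (my_valid str_)

-- ===== LEMMAS AND PROOFS =====

-- a single-character membership test 'i in "ab"' is just list membership
lemma isIn_singleton_ab (c : Char) :
    PySem.Chars.isIn [c] ['a', 'b'] = true ↔ (c = 'a' ∨ c = 'b') := by
  rw [PySem.Chars.isIn_iff_infix]
  constructor
  · intro h
    have := h.mem (by simp : c ∈ [c])
    simpa using this
  · rintro (rfl | rfl)
    · exact ⟨[], ['b'], rfl⟩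
    · exact ⟨['a'], [], rfl⟩

-- str.count of a single-character needle is List.count
lemma count_go_singleton (c : Char) :
    ∀ (s : List Char) (fuel acc : Nat), s.length ≤ fuel →
      PySem.Chars.count.go [c] fuel s acc = acc + s.count c := by
  intro s
  induction s with
  | nil =>
      intro fuel acc _
      cases fuel <;> simp [PySem.Chars.count.go]
  | cons h t ih =>
      intro fuel acc hf
      cases fuel with
      | zero => simp at hf
      | succ n =>
        rw [PySem.Chars.count.go]
        by_cases hc : c = h
        · subst hc
          have hpre : List.isPrefixOf [c] (c :: t) = true := by
            simp [List.isPrefixOf]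
          have hd : List.drop [c].length (c :: t) = t := by simp
          rw [if_pos hpre, hd, ih n (acc + 1) (by simp at hf; omega)]
          simp [List.count_cons]
          omega
        · have hp : List.isPrefixOf [c] (h :: t) = false := by
            simp [List.isPrefixOf]
            exact fun h' => hc h'
          rw [hp]
          simp only [Bool.false_eq_true, if_false]
          rw [ih n acc (by simp at hf; omega)]
          simp [List.count_cons]
          exact fun h' => hc h'.symm

lemma chars_count_singleton (s : List Char) (c : Char) :
    PySem.Chars.count s [c] = s.count c := by
  rw [PySem.Chars.count]
  simp only [List.isEmpty_cons, Bool.false_eq_true, if_false]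
  simpa using count_go_singleton c s s.length 0 le_rfl

-- A's loop equals B's guard-then-counts decomposition
lemma loop_eq (cs : List Char) : ∀ (c_a c_b : Int),
    myValidLoop cs c_a c_b =
      if cs.any (fun ch => !(PySem.Chars.isIn [ch] ['a', 'b'])) then 0
      else if PySem.Int.mod (c_a + cs.count 'a') 2 = 0 ∧
              ((c_b + cs.count 'b') > 0 ∧ PySem.Int.mod (c_b + cs.count 'b') 3 = 0)
           then 1 else 2 := by
  induction cs with
  | nil => intro c_a c_b; simp [myValidLoop]
  | cons i rest ih =>
      intro c_a c_b
      by_cases ha : i = 'a'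
      · subst ha
        have hin : (!(PySem.Chars.isIn ['a'] ['a', 'b'])) = false := by decide
        have hca : ((List.count 'a' ('a' :: rest) : Nat) : Int) = (rest.count 'a' : Int) + 1 := by
          simp [List.count_cons]
        have hcb : ((List.count 'b' ('a' :: rest) : Nat) : Int) = (rest.count 'b' : Int) := by
          simp [List.count_cons]
        simp only [myValidLoop]
        rw [if_pos trivial, ih, List.any_cons, hin]
        simp only [Bool.false_or]
        rw [show (('a' :: rest).count 'a' : Int) = (rest.count 'a' : Int) + 1 from hca,
            show (('a' :: rest).count 'b' : Int) = (rest.count 'b' : Int) from hcb,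
            show c_a + ((rest.count 'a' : Int) + 1) = c_a + 1 + (rest.count 'a' : Int) from by ring]
      · by_cases hb : i = 'b'
        · subst hb
          have hin : (!(PySem.Chars.isIn ['b'] ['a', 'b'])) = false := by decide
          have hca : ((List.count 'a' ('b' :: rest) : Nat) : Int) = (rest.count 'a' : Int) := by
            simp [List.count_cons]
          have hcb : ((List.count 'b' ('b' :: rest) : Nat) : Int) = (rest.count 'b' : Int) + 1 := by
            simp [List.count_cons]
          simp only [myValidLoop]
          rw [if_neg (by decide : ¬ ('b' = 'a')), if_pos trivial, ih, List.any_cons, hin]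
          simp only [Bool.false_or]
          rw [show (('b' :: rest).count 'a' : Int) = (rest.count 'a' : Int) from hca,
              show (('b' :: rest).count 'b' : Int) = (rest.count 'b' : Int) + 1 from hcb,
              show c_b + ((rest.count 'b' : Int) + 1) = c_b + 1 + (rest.count 'b' : Int) from by ring]
        · have hin : PySem.Chars.isIn [i] ['a', 'b'] = false := by
            rw [Bool.eq_false_iff]
            intro h
            rcases (isIn_singleton_ab i).mp h with h' | h' <;> [exact ha h'; exact hb h']
          simp [myValidLoop, ha, hb, hin]

-- ===== VERDICT (by name: the statement is the Claim_ definition above) =====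
theorem my_valid_spec : Claim_equal_my_valid := by
  intro str_ _
  unfold Spec_my_valid my_valid my_valid_alt
  by_cases hba : PySem.Str.isIn "ba" str_ <;> simp only [hba, if_pos, if_neg, Bool.false_eq_true, if_false, if_true]
  rw [loop_eq]
  by_cases hany : str_.toList.any (fun ch => !(PySem.Chars.isIn [ch] ['a', 'b'])) = true
  · simp [hany]
  · simp only [hany, Bool.false_eq_true, if_false]
    rw [PySem.Str.count_eq, PySem.Str.count_eq]
    show _ = _
    simp [chars_count_singleton]
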